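-- pv_equiv track=rewrite | github.com/AngelVasquezNep/backend-journal | book__think_python/word_play.py | reversive_age
-- ===== SOURCE A (Python) =====
-- from typing import Tuple, Union
--
-- def reversive_age(age: int) -> list[int]:
--     """
--     Try to find how many times the given mon's age was reversible with her child
--     Example:
--         mom's age 73
--         child age 37
--
--         That's one reverse coincidence, how many times that mon and her child
--         haved a reversible age?
--     """
--     assert 0 < age < 100, "Age out of range, try with values from 1 to 99"
--
--     def str_format(value: Union[int, str]) -> str:
--         return str(value).zfill(2)
--
--     def to_reverse(value: Union[int, str]) -> str:
--         return "".join(reversed(str_format(value)))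
--
--     age = str_format(age)
--     child = to_reverse(age)
--     diff = abs(int(age) - int(child))
--
--     coincidences = []
--
--     for age in range(0, 99):
--         mom_age = str_format(age + diff)
--         if str_format(age) == to_reverse(mom_age):
--             coincidences.append((age, mom_age))
--
--     return coincidences
-- ===== SOURCE B (Python) =====
-- def reversive_age(age: int) -> list:
--     assert 0 < age < 100, "Age out of range, try with values from 1 to 99"
--     s = str(age).zfill(2)
--     diff = abs(int(s) - int(s[::-1]))
--     k = diff // 9
--     coincidences = []
--     for t in range(10):
--         u = t - k
--         if 0 <= u <= 9:
--             c = 10 * u + t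
--             if c <= 98:
--                 coincidences.append((c, str(10 * t + u).zfill(2)))
--     return coincidences
-- ===== Notes on version B (the rewrite author's own statement) =====
-- stated objective: faster
-- what changed: Instead of scanning all 99 candidate child ages and comparing zero-filled strings against reversals, B enumerates the 10 possible tens digits of the mom's age and computes each coincidence arithmetically from diff//9.
import Mathlib
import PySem

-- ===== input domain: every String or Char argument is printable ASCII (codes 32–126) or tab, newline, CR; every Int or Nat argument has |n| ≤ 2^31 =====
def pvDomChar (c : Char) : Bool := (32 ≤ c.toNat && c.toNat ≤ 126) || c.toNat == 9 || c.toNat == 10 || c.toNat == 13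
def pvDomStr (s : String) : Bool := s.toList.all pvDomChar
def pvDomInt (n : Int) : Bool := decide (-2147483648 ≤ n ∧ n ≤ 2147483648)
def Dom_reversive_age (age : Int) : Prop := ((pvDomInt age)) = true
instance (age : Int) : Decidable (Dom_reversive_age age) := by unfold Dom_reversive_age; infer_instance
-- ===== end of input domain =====

-- B replaces A's scan over all 99 candidate ages by directly enumerating the 10 possible
-- tens digits of the mom's age (objective: faster by a constant factor, 10 iterations vs 99).

-- ===== PORT A =====
-- str_format(value) for an int argument: str(value).zfill(2)
def pvStrFormatI (v : Int) : String := PySem.Str.zfill (PySem.Int.toStr v) 2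
-- str_format(value) for a str argument: str(value) is the string itself
def pvStrFormatS (s : String) : String := PySem.Str.zfill s 2
-- to_reverse(value): "".join(reversed(str_format(value))) — reversed + join = list reverse (exact)
def pvToReverseS (s : String) : String := String.ofList (pvStrFormatS s).toList.reverse

-- the 'diff' computed before the loop; int(...) always parses inside Pre_, so getD 0 never fires
def pvDiffA (age : Int) : Int :=
  let ageS := pvStrFormatI age
  let child := pvToReverseS ageS
  |(PySem.Int.ofStr? ageS).getD 0 - (PySem.Int.ofStr? child).getD 0|

-- the 'for age in range(0, 99)' accumulation loop of A
def pvLoopA (diff : Int) : List (Int × String) :=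
  (PySem.List.pyRange 0 99 1).foldl (fun acc a =>
    let momAge := pvStrFormatI (a + diff)
    if pvStrFormatI a = pvToReverseS momAge then acc ++ [(a, momAge)] else acc) []

def reversive_age (age : Int) : List (Int × String) :=
  pvLoopA (pvDiffA age)

-- ===== PORT B =====
-- diff = abs(int(s) - int(s[::-1])) with s = str(age).zfill(2); s[::-1] = list reverse (exact)
def pvDiffB (age : Int) : Int :=
  let s := PySem.Str.zfill (PySem.Int.toStr age) 2
  |(PySem.Int.ofStr? s).getD 0 - (PySem.Int.ofStr? (String.ofList s.toList.reverse)).getD 0|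

-- B's loop over the 10 possible tens digits of the mom's age
def pvLoopB (diff : Int) : List (Int × String) :=
  let k := PySem.Int.floordiv diff 9
  (PySem.List.pyRange 0 10 1).foldl (fun acc t =>
    let u := t - k
    if 0 ≤ u ∧ u ≤ 9 then
      let c := 10 * u + t
      if c ≤ 98 then acc ++ [(c, PySem.Str.zfill (PySem.Int.toStr (10 * t + u)) 2)] else acc
    else acc) []

def reversive_age_alt (age : Int) : List (Int × String) :=
  pvLoopB (pvDiffB age)

-- ===== PRECONDITION & SPEC =====
-- A's assert raises AssertionError unless 0 < age < 100
def Pre_reversive_age (age : Int) : Prop := 0 < age ∧ age < 100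
instance (age : Int) : Decidable (Pre_reversive_age age) := by unfold Pre_reversive_age; infer_instance
def pvWitness_reversive_age : Int := (73)

def Spec_reversive_age (age : Int) (out : List (Int × String)) : Prop := out = reversive_age_alt age
instance (age : Int) (out : List (Int × String)) : Decidable (Spec_reversive_age age out) := by unfold Spec_reversive_age; infer_instance

-- ===== CLAIM (what is proved, stated in full; the proofs are below) =====
def Claim_equal_reversive_age : Prop := ∀ (age : Int), Dom_reversive_age age → Pre_reversive_age age → Spec_reversive_age age (reversive_age age)

-- ===== LEMMAS AND PROOFS =====
-- the two diff computations agree, and diff is always one of the ten multiples of 9 below 90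
set_option maxRecDepth 10000 in
set_option maxHeartbeats 1000000 in
theorem pvDiff_eq_and_mem :
    ∀ n : Nat, n < 99 → pvDiffA ((n : Int) + 1) = pvDiffB ((n : Int) + 1) ∧
      pvDiffA ((n : Int) + 1) ∈ ([0, 9, 18, 27, 36, 45, 54, 63, 72, 81] : List Int) := by
  decide

-- for each possible diff value, the two loops produce the same list
set_option maxRecDepth 10000 in
set_option maxHeartbeats 4000000 in
theorem pvLoop_eq :
    ∀ d ∈ ([0, 9, 18, 27, 36, 45, 54, 63, 72, 81] : List Int), pvLoopA d = pvLoopB d := by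
  decide

-- ===== VERDICT (by name: the statement is the Claim_ definition above) =====
theorem reversive_age_spec : Claim_equal_reversive_age := by
  intro age _ hpre
  unfold Spec_reversive_age
  obtain ⟨h1, h2⟩ := hpre
  have hn : age = ((age - 1).toNat : Int) + 1 := by omega
  have hlt : (age - 1).toNat < 99 := by omega
  obtain ⟨hd, hmem⟩ := pvDiff_eq_and_mem _ hlt
  rw [hn]
  show pvLoopA (pvDiffA _) = pvLoopB (pvDiffB _)
  rw [← hd]
  exact pvLoop_eq _ hmem
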